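-- pv_equiv track=rewrite | github.com/StandardRL-Components/GamesSample | games_0_set_2/game_05724.py | _find_contiguous_line
-- ===== SOURCE A (Python) =====
-- def _find_contiguous_line(points, axis):
--     if not points: return []
--     points.sort(key=lambda p: p[axis])
--     groups = []
--     current_group = [points[0]]
--     for i in range(1, len(points)):
--         if points[i][axis] == points[i-1][axis] + 1:
--             current_group.append(points[i])
--         else:
--             groups.append(current_group)
--             current_group = [points[i]]
--     groups.append(current_group)
--     return groups
-- ===== SOURCE B (Python) =====
-- def _find_contiguous_line(points, axis):
--     if not points:
--         return []
--     points.sort(key=lambda p: p[axis])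
--     n = len(points)
--     cuts = [0] + [i for i in range(1, n)
--                   if points[i][axis] != points[i - 1][axis] + 1] + [n]
--     return [points[b:e] for b, e in zip(cuts, cuts[1:])]
-- ===== Notes on version B (the rewrite author's own statement) =====
-- stated objective: alternative
-- what changed: Replaces the single pass that mutates a running current-group list with two staged passes: first collect the break indices where the sorted axis values fail to increase by 1, then materialise each group by slicing the sorted list between consecutive break indices.
import Mathlib
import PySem

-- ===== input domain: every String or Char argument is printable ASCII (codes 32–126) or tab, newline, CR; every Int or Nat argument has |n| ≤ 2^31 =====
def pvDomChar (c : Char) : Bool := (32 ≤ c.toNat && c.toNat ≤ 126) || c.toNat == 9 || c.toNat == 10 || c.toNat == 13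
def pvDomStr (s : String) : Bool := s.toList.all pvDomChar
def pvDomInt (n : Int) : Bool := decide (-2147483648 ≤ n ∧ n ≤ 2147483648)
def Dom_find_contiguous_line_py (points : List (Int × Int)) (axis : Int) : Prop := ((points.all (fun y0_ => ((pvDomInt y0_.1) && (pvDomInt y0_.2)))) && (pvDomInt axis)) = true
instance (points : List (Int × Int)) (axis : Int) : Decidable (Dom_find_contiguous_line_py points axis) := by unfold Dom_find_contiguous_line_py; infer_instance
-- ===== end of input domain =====

-- B replaces A's single accumulator pass by two staged passes: collect the break indices of
-- the sorted list, then slice between consecutive breaks (alternative decomposition; same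
-- in-place sort mutation as A; equivalence proved on the return value).


-- shared helper: Python's p[axis] on a pair (exact for axis ∈ {-2,-1,0,1}; the default is
-- never used under Pre_, which excludes the IndexError axes)
def pvPAxis (p : Int × Int) (axis : Int) : Int := (PySem.List.pyGet? [p.1, p.2] axis).getD 0

-- ===== PORT A =====
def find_contiguous_line_py (points : List (Int × Int)) (axis : Int) : List (List (Int × Int)) :=
  if points = [] then []
  else
    let pts := PySem.List.sorted points (fun p => pvPAxis p axis)
    let st := (PySem.List.pyRange 1 (pts.length : Int) 1).foldl
      (fun (st : List (List (Int × Int)) × List (Int × Int)) i =>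
        if pvPAxis (PySem.List.pyGetD pts i (0, 0)) axis
            = pvPAxis (PySem.List.pyGetD pts (i - 1) (0, 0)) axis + 1 then
          (st.1, st.2 ++ [PySem.List.pyGetD pts i (0, 0)])
        else
          (st.1 ++ [st.2], [PySem.List.pyGetD pts i (0, 0)]))
      ([], [PySem.List.pyGetD pts 0 (0, 0)])
    st.1 ++ [st.2]

-- ===== PORT B =====
def find_contiguous_line_py_alt (points : List (Int × Int)) (axis : Int) : List (List (Int × Int)) :=
  if points = [] then []
  else
    let pts := PySem.List.sorted points (fun p => pvPAxis p axis)
    let n : Int := (pts.length : Int)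
    let cuts : List Int := [0] ++ (PySem.List.pyRange 1 n 1).filter
        (fun i => decide (pvPAxis (PySem.List.pyGetD pts i (0, 0)) axis ≠
                          pvPAxis (PySem.List.pyGetD pts (i - 1) (0, 0)) axis + 1)) ++ [n]
    (cuts.zip cuts.tail).map (fun be => PySem.List.slice pts (some be.1) (some be.2))

-- ===== PRECONDITION & SPEC =====
-- Pre_ excludes exactly the inputs where Python raises IndexError: a nonempty list with an
-- axis outside {-2,-1,0,1} (tuple indexing p[axis] fails in the sort key).
def Pre_find_contiguous_line_py (points : List (Int × Int)) (axis : Int) : Prop :=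
  points = [] ∨ axis = 0 ∨ axis = 1 ∨ axis = -1 ∨ axis = -2
instance (points : List (Int × Int)) (axis : Int) : Decidable (Pre_find_contiguous_line_py points axis) := by unfold Pre_find_contiguous_line_py; infer_instance
def pvWitness_find_contiguous_line_py : (List (Int × Int)) × Int := ([(3, 0), (1, 5), (2, 7)], 0)

def Spec_find_contiguous_line_py (points : List (Int × Int)) (axis : Int) (out : List (List (Int × Int))) : Prop := out = find_contiguous_line_py_alt points axis
instance (points : List (Int × Int)) (axis : Int) (out : List (List (Int × Int))) : Decidable (Spec_find_contiguous_line_py points axis out) := by unfold Spec_find_contiguous_line_py; infer_instance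

-- ===== CLAIM (what is proved, stated in full; the proofs are below) =====
def Claim_equal_find_contiguous_line_py : Prop := ∀ (points : List (Int × Int)) (axis : Int), Dom_find_contiguous_line_py points axis → Pre_find_contiguous_line_py points axis → Spec_find_contiguous_line_py points axis (find_contiguous_line_py points axis)

-- ===== LEMMAS AND PROOFS =====

-- common specification both ports reduce to: split the tail into maximal +1-increment runs
def pvRunsSpec (f : Int × Int → Int) (prev : Int × Int) (cur : List (Int × Int)) :
    List (Int × Int) → List (List (Int × Int))
  | [] => [cur]
  | q :: rest =>
      if f q = f prev + 1 then pvRunsSpec f q (cur ++ [q]) rest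
      else cur :: pvRunsSpec f q [q] rest

theorem pvFoldA_eq_spec (f : Int × Int → Int) (pts : List (Int × Int)) :
    ∀ (k m : Nat) (gs : List (List (Int × Int))) (cur : List (Int × Int)),
      m < pts.length → k = pts.length - (m + 1) →
      (let st := (PySem.List.pyRange ((m : Int) + 1) (pts.length : Int) 1).foldl
        (fun (st : List (List (Int × Int)) × List (Int × Int)) i =>
          if f (PySem.List.pyGetD pts i (0, 0)) = f (PySem.List.pyGetD pts (i - 1) (0, 0)) + 1 then
            (st.1, st.2 ++ [PySem.List.pyGetD pts i (0, 0)])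
          else
            (st.1 ++ [st.2], [PySem.List.pyGetD pts i (0, 0)])) (gs, cur)
       st.1 ++ [st.2]) = gs ++ pvRunsSpec f (pts.getD m (0, 0)) cur (pts.drop (m + 1)) := by
  intro k
  induction k with
  | zero =>
    intro m gs cur hm hk
    have hlen : pts.length = m + 1 := by omega
    rw [PySem.List.pyRange_one_eq_nil (by push_cast [hlen]; omega)]
    rw [List.drop_eq_nil_of_le (by omega)]
    simp [pvRunsSpec]
  | succ k ih =>
    intro m gs cur hm hk
    have hm1 : m + 1 < pts.length := by omega
    rw [PySem.List.pyRange_one_cons (by omega)]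
    rw [List.foldl_cons]
    have hget1 : PySem.List.pyGetD pts ((m : Int) + 1) (0, 0) = pts.getD (m + 1) (0, 0) := by
      rw [show ((m : Int) + 1) = ((m + 1 : Nat) : Int) by push_cast; ring, PySem.List.pyGetD_natCast]
    have hget0 : PySem.List.pyGetD pts ((m : Int) + 1 - 1) (0, 0) = pts.getD m (0, 0) := by
      rw [show ((m : Int) + 1 - 1) = ((m : Nat) : Int) by ring, PySem.List.pyGetD_natCast]
    have hdrop : pts.drop (m + 1) = pts.getD (m + 1) (0, 0) :: pts.drop (m + 2) := by
      rw [List.getD_eq_getElem pts (0, 0) hm1]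
      exact List.drop_eq_getElem_cons hm1
    rw [hget1, hget0, hdrop]
    simp only [pvRunsSpec]
    by_cases h : f (pts.getD (m + 1) (0, 0)) = f (pts.getD m (0, 0)) + 1
    · rw [if_pos h, if_pos h]
      have := ih (m + 1) gs (cur ++ [pts.getD (m + 1) (0, 0)]) hm1 (by omega)
      simpa [show ((m : Int) + 1) + 1 = ((m + 1 : Nat) : Int) + 1 by push_cast; ring] using this
    · rw [if_neg h, if_neg h]
      have := ih (m + 1) (gs ++ [cur]) [pts.getD (m + 1) (0, 0)] hm1 (by omega)
      rw [show ((m : Int) + 1) + 1 = ((m + 1 : Nat) : Int) + 1 by push_cast; ring, this]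
      simp

-- B side: slicing the sorted list between consecutive break indices equals the run spec
theorem pvCutsB_eq_spec (f : Int × Int → Int) (pts : List (Int × Int)) :
    ∀ (k m b : Nat), m < pts.length → b ≤ m → k = pts.length - (m + 1) →
      (((b : Int) :: ((PySem.List.pyRange ((m : Int) + 1) (pts.length : Int) 1).filter
          (fun i => decide (f (PySem.List.pyGetD pts i (0, 0)) ≠
                            f (PySem.List.pyGetD pts (i - 1) (0, 0)) + 1)) ++ [(pts.length : Int)])).zip
        ((PySem.List.pyRange ((m : Int) + 1) (pts.length : Int) 1).filter
          (fun i => decide (f (PySem.List.pyGetD pts i (0, 0)) ≠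
                            f (PySem.List.pyGetD pts (i - 1) (0, 0)) + 1)) ++ [(pts.length : Int)])).map
        (fun be => PySem.List.slice pts (some be.1) (some be.2))
      = pvRunsSpec f (pts.getD m (0, 0)) ((pts.drop b).take (m + 1 - b)) (pts.drop (m + 1)) := by
  intro k
  induction k with
  | zero =>
    intro m b hm hb hk
    have hlen : pts.length = m + 1 := by omega
    rw [PySem.List.pyRange_one_eq_nil (by push_cast [hlen]; omega)]
    rw [show List.drop (m + 1) pts = ([] : List (Int × Int)) from
      List.drop_eq_nil_of_le (by omega)]
    simp only [List.filter_nil, List.nil_append, List.zip_cons_cons, List.zip_nil_right,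
      List.map_cons, List.map_nil, pvRunsSpec]
    rw [PySem.List.slice_natCast, hlen]
  | succ k ih =>
    intro m b hm hb hk
    have hm1 : m + 1 < pts.length := by omega
    rw [PySem.List.pyRange_one_cons (by omega)]
    rw [List.filter_cons]
    have hget1 : PySem.List.pyGetD pts ((m : Int) + 1) (0, 0) = pts.getD (m + 1) (0, 0) := by
      rw [show ((m : Int) + 1) = ((m + 1 : Nat) : Int) by push_cast; ring, PySem.List.pyGetD_natCast]
    have hget0 : PySem.List.pyGetD pts ((m : Int) + 1 - 1) (0, 0) = pts.getD m (0, 0) := by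
      rw [show ((m : Int) + 1 - 1) = ((m : Nat) : Int) by ring, PySem.List.pyGetD_natCast]
    have hdrop : pts.drop (m + 1) = pts.getD (m + 1) (0, 0) :: pts.drop (m + 2) := by
      rw [List.getD_eq_getElem pts (0, 0) hm1]
      exact List.drop_eq_getElem_cons hm1
    have hcond : (decide (f (PySem.List.pyGetD pts ((m : Int) + 1) (0, 0)) ≠
          f (PySem.List.pyGetD pts ((m : Int) + 1 - 1) (0, 0)) + 1) = true)
        ↔ ¬ f (pts.getD (m + 1) (0, 0)) = f (pts.getD m (0, 0)) + 1 := by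
      rw [hget1, hget0]; simp
    rw [hdrop]
    simp only [pvRunsSpec]
    have hcast : ((m : Int) + 1) + 1 = ((m + 1 : Nat) : Int) + 1 := by push_cast; ring
    have hmcast : ((m : Int) + 1) = ((m + 1 : Nat) : Int) := by push_cast; ring
    by_cases h : f (pts.getD (m + 1) (0, 0)) = f (pts.getD m (0, 0)) + 1
    · rw [if_neg (by rw [hcond]; exact not_not_intro h), if_pos h]
      have := ih (m + 1) b hm1 (by omega) (by omega)
      rw [hcast, this]
      -- (drop b).take (m+1-b) ++ [pts[m+1]] = (drop b).take (m+2-b)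
      congr 1
      have hlt : m + 1 - b < (pts.drop b).length := by
        simp only [List.length_drop]; omega
      rw [show m + 1 + 1 - b = (m + 1 - b) + 1 by omega]
      rw [List.take_add_one]
      congr 1
      rw [List.getElem?_eq_getElem hlt]
      simp only [List.getElem_drop, show b + (m + 1 - b) = m + 1 from by omega]
      rw [List.getD_eq_getElem pts (0, 0) hm1]
      simp
    · rw [if_pos (hcond.mpr h), if_neg h]
      simp only [List.cons_append, List.zip_cons_cons, List.map_cons]
      have := ih (m + 1) (m + 1) hm1 (by omega) (by omega)
      rw [hcast, hmcast, this]
      congr 1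
      · rw [PySem.List.slice_natCast]
      · rw [show m + 1 + 1 - (m + 1) = 1 by omega, hdrop]
        simp

-- ===== VERDICT (by name: the statement is the Claim_ definition above) =====
theorem find_contiguous_line_py_spec : Claim_equal_find_contiguous_line_py := by
  intro points axis _ _
  unfold Spec_find_contiguous_line_py find_contiguous_line_py find_contiguous_line_py_alt
  by_cases hpts : points = []
  · simp [hpts]
  · simp only [if_neg hpts]
    have hne : PySem.List.sorted points (fun p => pvPAxis p axis) ≠ [] := by
      rw [Ne, PySem.List.sorted_eq_nil_iff]; exact hpts
    obtain ⟨p, rest, hcons⟩ := List.exists_cons_of_ne_nil hne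
    rw [hcons]
    have hA := pvFoldA_eq_spec (fun q => pvPAxis q axis) (p :: rest) rest.length 0 []
      [PySem.List.pyGetD (p :: rest) 0 (0, 0)] (by simp) (by simp)
    simp only [show ((0 : Nat) : Int) + 1 = 1 by norm_num] at hA
    rw [hA]
    have hB := pvCutsB_eq_spec (fun q => pvPAxis q axis) (p :: rest) rest.length 0 0
      (by simp) (by omega) (by simp)
    simp only [Nat.cast_zero, zero_add, Nat.sub_zero, List.drop_zero] at hB
    simp only [List.cons_append, List.nil_append, List.tail_cons]
    rw [hB]
    simp [PySem.List.pyGetD_zero_cons]
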